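-- pv_equiv track=rewrite | github.com/Vashidiwakar/Digital-Image-Processing-And-Machine-Learning | BG3.py | bigrams_in_order_and_consecutive
-- ===== SOURCE A (Python) =====
-- def generate_bigrams(word):
--     return [word[i:i+2] for i in range(len(word) - 1)]
--
-- def bigrams_in_order_and_consecutive(word, bigrams):
--     word_bigrams = generate_bigrams(word)
--
--     # Check for consecutive occurrence
--     index = 0
--     for bigram in bigrams:
--         try:
--             index = word_bigrams.index(bigram, index)
--         except ValueError:
--             return False
--         index += 1
--     return True
-- ===== SOURCE B (Python) =====
-- def bigrams_in_order_and_consecutive(word, bigrams):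
--     remaining = list(bigrams)
--     for i in range(len(word) - 1):
--         if remaining and word[i:i+2] == remaining[0]:
--             remaining = remaining[1:]
--     return not remaining
-- ===== Notes on version B (the rewrite author's own statement) =====
-- stated objective: alternative
-- what changed: Replaces A's loop over the needle bigrams with repeated list.index(bigram, start) searches into the word's bigram list by a single pass over the word's positions that consumes the needle list from the front (two-pointer subsequence scan), returning whether the needle is exhausted.
import Mathlib
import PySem

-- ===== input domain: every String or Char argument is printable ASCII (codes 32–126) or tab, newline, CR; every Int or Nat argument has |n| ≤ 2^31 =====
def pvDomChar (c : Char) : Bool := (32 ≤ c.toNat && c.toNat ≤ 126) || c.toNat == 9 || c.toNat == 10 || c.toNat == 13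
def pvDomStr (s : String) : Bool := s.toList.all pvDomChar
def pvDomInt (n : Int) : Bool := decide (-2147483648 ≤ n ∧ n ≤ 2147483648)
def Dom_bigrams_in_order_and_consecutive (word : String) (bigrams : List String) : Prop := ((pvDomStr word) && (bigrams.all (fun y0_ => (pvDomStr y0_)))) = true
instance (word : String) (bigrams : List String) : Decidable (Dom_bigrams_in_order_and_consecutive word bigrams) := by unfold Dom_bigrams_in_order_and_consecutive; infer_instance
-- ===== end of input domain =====

-- B replaces A's needle-driven loop of .index searches by a single haystack scan
-- with a needle pointer (objective: alternative decomposition, same linear cost).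
-- ===== PORT A =====
-- generate_bigrams(word) = [word[i:i+2] for i in range(len(word) - 1)]
def generate_bigrams (word : String) : List String :=
  (PySem.List.pyRange 0 (PySem.Str.len word - 1) 1).map
    (fun i => PySem.Str.slice word (some i) (some (i + 2)))

-- word_bigrams.index(bigram, index): first occurrence at position ≥ start, none = ValueError
def pvIndexFrom (xs : List String) (v : String) (start : Nat) : Option Nat :=
  (PySem.List.index? (xs.drop start) v).map (· + start)

-- A's 'for bigram in bigrams' loop carrying the running index
def pvALoop (word_bigrams : List String) (bigrams : List String) (index : Nat) : Bool :=
  match bigrams with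
  | [] => true
  | bigram :: rest =>
    match pvIndexFrom word_bigrams bigram index with
    | none => false                       -- except ValueError: return False
    | some k => pvALoop word_bigrams rest (k + 1)

def bigrams_in_order_and_consecutive (word : String) (bigrams : List String) : Bool :=
  let word_bigrams := generate_bigrams word
  pvALoop word_bigrams bigrams 0

-- ===== PORT B =====
-- single pass over i in range(len(word)-1), consuming 'remaining' from the front
def bigrams_in_order_and_consecutive_alt (word : String) (bigrams : List String) : Bool :=
  let remaining :=
    (PySem.List.pyRange 0 (PySem.Str.len word - 1) 1).foldl
      (fun rem i =>
        match rem with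
        | [] => []
        | b :: rest =>
          if PySem.Str.slice word (some i) (some (i + 2)) == b then rest else b :: rest)
      bigrams
  remaining.isEmpty

-- ===== PRECONDITION & SPEC =====
def Spec_bigrams_in_order_and_consecutive (word : String) (bigrams : List String) (out : Bool) : Prop := out = bigrams_in_order_and_consecutive_alt word bigrams
instance (word : String) (bigrams : List String) (out : Bool) : Decidable (Spec_bigrams_in_order_and_consecutive word bigrams out) := by unfold Spec_bigrams_in_order_and_consecutive; infer_instance

-- ===== CLAIM (what is proved, stated in full; the proofs are below) =====
def Claim_equal_bigrams_in_order_and_consecutive : Prop := ∀ (word : String) (bigrams : List String), Dom_bigrams_in_order_and_consecutive word bigrams → Spec_bigrams_in_order_and_consecutive word bigrams (bigrams_in_order_and_consecutive word bigrams)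

-- ===== LEMMAS AND PROOFS =====
-- B's loop body, with the current word-bigram abstracted out
def pvScan (rem : List String) (s : String) : List String :=
  match rem with
  | [] => []
  | b :: rest => if s == b then rest else b :: rest

theorem pvScan_foldl_nil (l : List String) : l.foldl pvScan [] = [] := by
  induction l with
  | nil => rfl
  | cons h t ih => simpa [pvScan] using ih

theorem pvScan_foldl_not_mem (l : List String) (b : String) (rest : List String)
    (hb : b ∉ l) : l.foldl pvScan (b :: rest) = b :: rest := by
  induction l with
  | nil => rfl
  | cons h t ih =>
    have hne : h ≠ b := fun e => hb (e ▸ List.mem_cons_self ..)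
    have : (h == b) = false := beq_eq_false_iff_ne.mpr hne
    simp only [List.foldl_cons, pvScan, this]
    exact ih (fun hm => hb (List.mem_cons_of_mem _ hm))

theorem pvALoop_eq_scan (bigrams : List String) (wb : List String) (start : Nat) :
    pvALoop wb bigrams start = ((wb.drop start).foldl pvScan bigrams).isEmpty := by
  induction bigrams generalizing start with
  | nil => simp [pvALoop, pvScan_foldl_nil]
  | cons b rest ih =>
    cases hidx : PySem.List.index? (wb.drop start) b with
    | none =>
      have hb : b ∉ wb.drop start := (PySem.List.index?_eq_none_iff _ _).mp hidx
      rw [PySem.List.index?_eq_idxOf?] at hidx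
      simp [pvALoop, pvIndexFrom, hidx, pvScan_foldl_not_mem _ _ _ hb]
    | some k =>
      obtain ⟨pre, suf, hsplit, hlen, hnot⟩ := (PySem.List.index?_eq_some_iff _ _ _).mp hidx
      rw [PySem.List.index?_eq_idxOf?] at hidx
      have hsuf : wb.drop (k + start + 1) = suf := by
        have : wb.drop (k + start + 1) = (wb.drop start).drop (k + 1) := by
          rw [List.drop_drop]; ring_nf
        rw [this, hsplit, ← hlen]
        simp
      calc pvALoop wb (b :: rest) start
          = pvALoop wb rest (k + start + 1) := by
            simp [pvALoop, pvIndexFrom, hidx]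
        _ = ((wb.drop (k + start + 1)).foldl pvScan rest).isEmpty := ih _
        _ = ((wb.drop start).foldl pvScan (b :: rest)).isEmpty := by
            rw [hsuf, hsplit, List.foldl_append, pvScan_foldl_not_mem _ _ _ hnot]
            simp [pvScan]

-- ===== VERDICT (by name: the statement is the Claim_ definition above) =====
theorem bigrams_in_order_and_consecutive_spec : Claim_equal_bigrams_in_order_and_consecutive := by
  intro word bigrams _
  unfold Spec_bigrams_in_order_and_consecutive bigrams_in_order_and_consecutive
    bigrams_in_order_and_consecutive_alt
  rw [show (fun (rem : List String) (i : Int) =>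
        match rem with
        | [] => ([] : List String)
        | b :: rest =>
          if PySem.Str.slice word (some i) (some (i + 2)) == b then rest else b :: rest)
      = (fun rem i => pvScan rem (PySem.Str.slice word (some i) (some (i + 2)))) from rfl,
    ← List.foldl_map]
  simpa [generate_bigrams] using pvALoop_eq_scan bigrams (generate_bigrams word) 0
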